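-- pv_equiv track=rewrite | github.com/junsulee/oss-audit-report | oss_audit_report.py | annotate_sbom_with_severity
-- ===== SOURCE A (Python) =====
-- def annotate_sbom_with_severity(sbom_data, security_table):
--     # index 취약점: (Comp Name, Version, Source, CVE) → Severity
--     vuln_map = {}
--     for sec in security_table:
--         key = (sec.get('Component Name', ''), sec.get('Version', ''), sec.get('Source', ''), sec.get('CVE', ''))
--         if sec.get('Severity'):
--             vuln_map[key] = sec['Severity']
--     for row in sbom_data:
--         if row.get('CVE'):
--             key = (row.get('Component Name', ''), row.get('Version', ''), row.get('Source', ''), row.get('CVE', ''))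
--             if key in vuln_map:
--                 row['Severity'] = vuln_map[key]
--     return sbom_data
-- ===== SOURCE B (Python) =====
-- # B: no vuln_map index; per row a direct scan of security_table, last match wins
-- # (mutates the row dicts in place and returns sbom_data, like A).
--
-- def _key(d):
--     return (d.get('Component Name', ''), d.get('Version', ''), d.get('Source', ''), d.get('CVE', ''))
--
--
-- def annotate_sbom_with_severity(sbom_data, security_table):
--     for row in sbom_data:
--         if row.get('CVE'):
--             key = _key(row)
--             for sec in security_table:
--                 if sec.get('Severity') and _key(sec) == key:
--                     row['Severity'] = sec['Severity']
--     return sbom_data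
-- ===== Notes on version B (the rewrite author's own statement) =====
-- stated objective: simpler
-- what changed: Dropped the vuln_map dictionary index entirely: B does a direct inner scan of security_table for each CVE-bearing SBOM row, letting the last matching entry win (which reproduces the dict's overwrite semantics).
import Mathlib
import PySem

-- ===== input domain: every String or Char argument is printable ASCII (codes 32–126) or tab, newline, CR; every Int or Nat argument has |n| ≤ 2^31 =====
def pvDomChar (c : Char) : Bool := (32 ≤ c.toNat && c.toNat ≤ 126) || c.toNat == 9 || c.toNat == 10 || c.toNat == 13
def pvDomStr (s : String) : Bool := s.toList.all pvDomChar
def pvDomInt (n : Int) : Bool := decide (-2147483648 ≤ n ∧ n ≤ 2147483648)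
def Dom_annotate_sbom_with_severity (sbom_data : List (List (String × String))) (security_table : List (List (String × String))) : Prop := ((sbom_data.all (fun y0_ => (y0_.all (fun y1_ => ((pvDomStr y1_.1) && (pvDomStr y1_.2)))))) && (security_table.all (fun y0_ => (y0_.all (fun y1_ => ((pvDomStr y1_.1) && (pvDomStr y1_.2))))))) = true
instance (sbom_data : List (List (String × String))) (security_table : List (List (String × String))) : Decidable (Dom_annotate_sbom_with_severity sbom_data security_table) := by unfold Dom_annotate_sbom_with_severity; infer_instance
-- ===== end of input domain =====

-- B drops A's vuln_map index and scans security_table directly per row (last match wins); simpler, not faster.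
-- Both Pythons mutate the row dicts in place and return sbom_data; the equivalence proved is about the return value.

-- shared helpers (both Pythons compute the same key tuple; B factors it as _key)
-- d.get(k, '') on the four key fields
def pvKey (d : PySem.Dict String String) : String × String × String × String :=
  (d.getD "Component Name" "", d.getD "Version" "", d.getD "Source" "", d.getD "CVE" "")

-- sec.get('Severity') under Python truthiness: some v iff present and non-empty (then sec['Severity'] = v)
def pvSev (d : PySem.Dict String String) : Option String :=
  match d.get? "Severity" with
  | some v => if v = "" then none else some v
  | none => none

-- Python truthiness of row.get('CVE')
def pvTruthy : Option String → Bool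
  | some s => !(s == "")
  | none => false

-- ===== PORT A =====
def annotate_sbom_with_severity (sbom_data : List (List (String × String))) (security_table : List (List (String × String))) : List (List (String × String)) :=
  let vm : PySem.Dict (String × String × String × String) String :=
    security_table.foldl (fun m sec0 =>
      let sec := PySem.Dict.mk sec0
      match pvSev sec with
      | some v => m.insert (pvKey sec) v
      | none => m) PySem.Dict.empty
  sbom_data.map (fun row0 =>
    let row := PySem.Dict.mk row0
    if pvTruthy (row.get? "CVE") then
      match vm.get? (pvKey row) with
      | some v => (row.insert "Severity" v).items
      | none => row0
    else row0)

-- ===== PORT B =====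
def annotate_sbom_with_severity_alt (sbom_data : List (List (String × String))) (security_table : List (List (String × String))) : List (List (String × String)) :=
  sbom_data.map (fun row0 =>
    let row := PySem.Dict.mk row0
    if pvTruthy (row.get? "CVE") then
      (security_table.foldl (fun r sec0 =>
        let sec := PySem.Dict.mk sec0
        match pvSev sec with
        | some v => if pvKey sec = pvKey row then r.insert "Severity" v else r
        | none => r) row).items
    else row0)

-- ===== PRECONDITION & SPEC =====
def Spec_annotate_sbom_with_severity (sbom_data : List (List (String × String))) (security_table : List (List (String × String))) (out : List (List (String × String))) : Prop := out = annotate_sbom_with_severity_alt sbom_data security_table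
instance (sbom_data : List (List (String × String))) (security_table : List (List (String × String))) (out : List (List (String × String))) : Decidable (Spec_annotate_sbom_with_severity sbom_data security_table out) := by unfold Spec_annotate_sbom_with_severity; infer_instance

-- ===== CLAIM (what is proved, stated in full; the proofs are below) =====
def Claim_equal_annotate_sbom_with_severity : Prop := ∀ (sbom_data : List (List (String × String))) (security_table : List (List (String × String))), Dom_annotate_sbom_with_severity sbom_data security_table → Spec_annotate_sbom_with_severity sbom_data security_table (annotate_sbom_with_severity sbom_data security_table)

-- ===== LEMMAS AND PROOFS =====

-- last entry of st whose key matches `key` and whose Severity is truthy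
def pvLast (st : List (List (String × String))) (key : String × String × String × String) : Option String :=
  match st with
  | [] => none
  | sec0 :: rest =>
    match pvLast rest key with
    | some v => some v
    | none =>
      match pvSev (PySem.Dict.mk sec0) with
      | some v => if pvKey (PySem.Dict.mk sec0) = key then some v else none
      | none => none

theorem pvA_fold (st : List (List (String × String))) (m : PySem.Dict (String × String × String × String) String) (key : String × String × String × String) :
    (st.foldl (fun m sec0 =>
      let sec := PySem.Dict.mk sec0
      match pvSev sec with
      | some v => m.insert (pvKey sec) v
      | none => m) m).get? key =
    (match pvLast st key with
     | some v => some v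
     | none => m.get? key) := by
  induction st generalizing m with
  | nil => simp [pvLast]
  | cons sec0 rest ih =>
    simp only [List.foldl_cons, ih, pvLast]
    cases pvLast rest key with
    | some v => rfl
    | none =>
      cases pvSev (PySem.Dict.mk sec0) with
      | none => rfl
      | some v =>
        by_cases h : pvKey (PySem.Dict.mk sec0) = key
        · simp [h, PySem.Dict.get?_insert_self]
        · simp [h, PySem.Dict.get?_insert_of_ne (hne := fun hk => h hk.symm)]

theorem pvB_fold (st : List (List (String × String))) (r : PySem.Dict String String) (key : String × String × String × String) :
    (st.foldl (fun r sec0 =>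
      let sec := PySem.Dict.mk sec0
      match pvSev sec with
      | some v => if pvKey sec = key then r.insert "Severity" v else r
      | none => r) r) =
    (match pvLast st key with
     | some v => r.insert "Severity" v
     | none => r) := by
  induction st generalizing r with
  | nil => simp [pvLast]
  | cons sec0 rest ih =>
    simp only [List.foldl_cons, ih, pvLast]
    cases pvLast rest key with
    | some v =>
      cases hs : pvSev (PySem.Dict.mk sec0) with
      | none => rfl
      | some w =>
        by_cases h : pvKey (PySem.Dict.mk sec0) = key
        · simp [h, PySem.Dict.insert_insert_self]
        · simp [h]
    | none =>
      cases hs : pvSev (PySem.Dict.mk sec0) with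
      | none => rfl
      | some w =>
        by_cases h : pvKey (PySem.Dict.mk sec0) = key
        · simp [h]
        · simp [h]

-- ===== VERDICT (by name: the statement is the Claim_ definition above) =====
theorem annotate_sbom_with_severity_spec : Claim_equal_annotate_sbom_with_severity := by
  intro sbom st _
  unfold Spec_annotate_sbom_with_severity annotate_sbom_with_severity annotate_sbom_with_severity_alt
  refine List.map_congr_left fun row0 _ => ?_
  by_cases hc : pvTruthy ((PySem.Dict.mk row0).get? "CVE") = true
  · simp only [hc, if_true, pvA_fold _ _ _, pvB_fold _ _ _]
    cases pvLast st (pvKey (PySem.Dict.mk row0)) with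
    | some v => rfl
    | none => simp [PySem.Dict.get?_empty]
  · simp [hc]
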